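-- pv_equiv track=rewrite | github.com/crap0101/laundry_basket | merge-sort+Injecretor.py | sort_two
-- ===== SOURCE A (Python) =====
-- from collections.abc import Sequence, Callable, Iterable
-- import itertools
--
-- def sort_two (seq: Sequence) -> Sequence:
--     """Return sorted seqs of items, two by two."""
--     pairs = []
--     for lst in takes(seq, 2):
--         if len(lst) == 1:
--             pairs.append(tuple(lst))
--         else:
--             a, b = lst
--             pairs.append((b,a) if a > b else (a, b))
--     return pairs
--
-- def takes (seq: Sequence, n: int) -> Iterable:
--     """Yields chunk of `n` items a times from `seq`"""
--     it = iter(seq)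
--     while True:
--         p = list(itertools.islice(it, 0, n))
--         if not p:
--             return
--         yield p
-- ===== SOURCE B (Python) =====
-- def sort_two(seq):
--     """Return sorted seqs of items, two by two."""
--     evens, odds = seq[::2], seq[1::2]
--     pairs = [(min(a, b), max(a, b)) for a, b in zip(evens, odds)]
--     if len(seq) % 2:
--         pairs.append((seq[-1],))
--     return pairs
-- ===== Notes on version B (the rewrite author's own statement) =====
-- stated objective: idiomatic
-- what changed: Instead of consuming the sequence chunk-by-chunk through the islice generator `takes` with a per-chunk branch-and-swap, B splits the sequence into the two strided slices seq[::2] and seq[1::2], zips them and maps (min, max) over each pair, appending the lone last element afterwards when the length is odd.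
import Mathlib
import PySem

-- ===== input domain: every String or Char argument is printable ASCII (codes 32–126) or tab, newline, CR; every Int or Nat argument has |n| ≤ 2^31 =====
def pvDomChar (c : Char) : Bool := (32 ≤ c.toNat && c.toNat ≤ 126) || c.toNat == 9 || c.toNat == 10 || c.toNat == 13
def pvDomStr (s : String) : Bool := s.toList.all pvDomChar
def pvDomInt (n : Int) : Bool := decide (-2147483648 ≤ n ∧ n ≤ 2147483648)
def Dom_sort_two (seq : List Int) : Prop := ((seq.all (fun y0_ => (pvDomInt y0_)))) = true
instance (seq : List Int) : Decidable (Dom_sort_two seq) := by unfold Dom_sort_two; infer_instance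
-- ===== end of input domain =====

-- B replaces A's chunk-consuming generator loop by zipping the strided slices
-- seq[::2] and seq[1::2] with (min, max) per pair plus an odd-length tail (idiomatic; same cost).


-- ===== PORT A =====
-- A consumes the sequence through the generator `takes(seq, 2)`: chunks of ≤ 2
-- items taken from the front until the iterator is exhausted; structural
-- two-at-a-time recursion is the literal transcription of that consumer loop.
def sort_two (seq : List Int) : List (List Int) :=
  match seq with
  | [] => []
  | [a] => [[a]]
  | a :: b :: rest => (if a > b then [b, a] else [a, b]) :: sort_two rest

-- ===== PORT B =====
-- Source B: evens, odds = seq[::2], seq[1::2]; pairs = [(min a b, max a b) for (a,b) in zip];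
-- append (seq[-1],) when len(seq) is odd.  slice? is PySem's xs[start:stop:step];
-- with step 2 it always returns some, so the `none` arms are unreachable.
def sort_two_alt (seq : List Int) : List (List Int) :=
  match PySem.List.slice? seq none none 2, PySem.List.slice? seq (some 1) none 2 with
  | some evens, some odds =>
      let pairs := (evens.zip odds).map (fun p => [min p.1 p.2, max p.1 p.2])
      if PySem.Int.mod (seq.length : Int) 2 ≠ 0 then
        match PySem.List.pyGet? seq (-1) with
        | some x => pairs ++ [[x]]
        | none => pairs      -- unreachable: odd length means seq ≠ []
      else pairs
  | _, _ => []               -- unreachable: step 2 ≠ 0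

-- ===== PRECONDITION & SPEC =====
def Spec_sort_two (seq : List Int) (out : List (List Int)) : Prop := out = sort_two_alt seq
instance (seq : List Int) (out : List (List Int)) : Decidable (Spec_sort_two seq out) := by unfold Spec_sort_two; infer_instance

-- ===== CLAIM (what is proved, stated in full; the proofs are below) =====
def Claim_equal_sort_two : Prop := ∀ (seq : List Int), Dom_sort_two seq → Spec_sort_two seq (sort_two seq)

-- ===== LEMMAS AND PROOFS =====

-- every-other element, starting at index 0 (the value of seq[::2])
def pvEvens : List Int → List Int
  | [] => []
  | [a] => [a]
  | a :: _ :: t => a :: pvEvens t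

-- sort_two_alt after evaluating the two slices
def pvBody (seq : List Int) : List (List Int) :=
  let pairs := ((pvEvens seq).zip (pvEvens seq.tail)).map (fun p => [min p.1 p.2, max p.1 p.2])
  if PySem.Int.mod (seq.length : Int) 2 ≠ 0 then
    match PySem.List.pyGet? seq (-1) with
    | some x => pairs ++ [[x]]
    | none => pairs
  else pairs

lemma filterMap_two_step (xs : List Int) :
    List.filterMap (fun k => xs[2 * k]?) (List.range ((xs.length + 1) / 2)) = pvEvens xs := by
  induction xs using pvEvens.induct with
  | case1 => simp [pvEvens]
  | case2 a => simp [pvEvens, List.range_succ]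
  | case3 a b t ih =>
      have hlen : ((a :: b :: t).length + 1) / 2 = (t.length + 1) / 2 + 1 := by
        simp; omega
      rw [hlen, List.range_succ_eq_map]
      simp only [List.filterMap_cons, List.filterMap_map]
      have h0 : (a :: b :: t)[2 * 0]? = some a := by simp
      rw [h0]
      have hf : ∀ k : ℕ, (a :: b :: t)[2 * (k + 1)]? = t[2 * k]? := by
        intro k
        have : 2 * (k + 1) = 2 * k + 2 := by ring
        simp [this]
      simp only [Function.comp]
      rw [List.filterMap_congr (by intro k _; exact hf k), ih]
      rfl

lemma slice?_evens (xs : List Int) :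
    PySem.List.slice? xs none none 2 = some (pvEvens xs) := by
  unfold PySem.List.slice? PySem.List.sliceIndices
  simp only [if_neg (by norm_num : ¬ (2:Int) = 0)]
  norm_num
  by_cases h : 0 < xs.length
  · rw [if_pos (by exact_mod_cast h)]
    have hcnt : (((xs.length : Int) + 2 - 1) / 2).toNat = (xs.length + 1) / 2 := by omega
    rw [hcnt]
    rw [← filterMap_two_step xs]
    apply List.filterMap_congr
    intro k _
    have : ((2 : Int) * (k : Int)).toNat = 2 * k := by omega
    rw [this]
  · rw [if_neg (by exact_mod_cast h)]
    have : xs = [] := by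
      cases xs with
      | nil => rfl
      | cons a t => simp at h
    subst this
    simp [pvEvens]

lemma slice?_odds (xs : List Int) :
    PySem.List.slice? xs (some 1) none 2 = some (pvEvens xs.tail) := by
  cases xs with
  | nil => decide
  | cons a t =>
      unfold PySem.List.slice? PySem.List.sliceIndices
      simp only [if_neg (by norm_num : ¬ (2:Int) = 0)]
      norm_num
      by_cases h : 0 < t.length
      · rw [if_pos h]
        have hcnt : (((t.length : Int) + 2 - 1) / 2).toNat = (t.length + 1) / 2 := by omega
        rw [hcnt, ← filterMap_two_step t]
        apply List.filterMap_congr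
        intro k _
        have h1 : ((1 : Int) + 2 * (k : Int)).toNat = 2 * k + 1 := by omega
        rw [h1]
        simp
      · rw [if_neg h]
        have : t = [] := by
          cases t with
          | nil => rfl
          | cons b u => simp at h
        subst this
        simp [pvEvens]

lemma alt_red (seq : List Int) : sort_two_alt seq = pvBody seq := by
  unfold sort_two_alt
  rw [slice?_evens, slice?_odds]
  rfl

lemma alt_eq (seq : List Int) : sort_two_alt seq = sort_two seq := by
  rw [alt_red]
  induction seq using sort_two.induct with
  | case1 => decide
  | case2 a =>
      simp [pvBody, sort_two, pvEvens, PySem.Int.mod, PySem.List.pyGet?, PySem.List.pyIdx?]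
  | case3 a b t ih =>
      unfold pvBody at ih ⊢
      have hev : pvEvens (a :: b :: t) = a :: pvEvens t := rfl
      have ht : pvEvens (a :: b :: t).tail = b :: pvEvens t.tail := by
        cases t with
        | nil => rfl
        | cons c u => rfl
      rw [hev, ht]
      simp only [List.zip_cons_cons, List.map_cons]
      have hmod : PySem.Int.mod (((a :: b :: t).length : Int)) 2 = PySem.Int.mod ((t.length : Int)) 2 := by
        simp only [PySem.Int.mod, List.length_cons]
        push_cast
        rw [show ((t.length : Int) + 1 + 1) = (t.length : Int) + 2 by ring, Int.add_fmod_right]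
      rw [hmod]
      have hpair : [min a b, max a b] = if a > b then [b, a] else [a, b] := by
        rcases le_or_gt a b with h | h
        · rw [if_neg (by omega), min_eq_left h, max_eq_right h]
        · rw [if_pos h, min_eq_right (le_of_lt h), max_eq_left (le_of_lt h)]
      by_cases hm : PySem.Int.mod ((t.length : Int)) 2 ≠ 0
      · rw [if_pos hm] at ih ⊢
        have htne : t ≠ [] := by
          intro h; subst h; simp [PySem.Int.mod] at hm
        have hlast : PySem.List.pyGet? (a :: b :: t) (-1) = PySem.List.pyGet? t (-1) := by
          rw [PySem.List.pyGet?_neg_one, PySem.List.pyGet?_neg_one, List.getLast?_cons_cons]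
          cases t with
          | nil => exact absurd rfl htne
          | cons c u => rw [List.getLast?_cons_cons]
        rw [hlast]
        cases hopt : PySem.List.pyGet? t (-1) with
        | none => rw [hopt] at ih; simp [sort_two, ← ih, hpair]
        | some x => rw [hopt] at ih; simp [sort_two, ← ih, hpair]
      · rw [if_neg hm] at ih ⊢
        simp [sort_two, ← ih, hpair]

-- ===== VERDICT (by name: the statement is the Claim_ definition above) =====
theorem sort_two_spec : Claim_equal_sort_two := by
  intro seq _
  unfold Spec_sort_two
  exact (alt_eq seq).symm
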